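-- pv_equiv track=rewrite | github.com/dontaysolar/tps19 | test_restore/credential_security_hardener.py | _is_placeholder_value
-- ===== SOURCE A (Python) =====
-- def _is_placeholder_value(value: str) -> bool:
--     """Check if value is placeholder - ATLAS: Fixed function length"""
--     assert isinstance(value, str), "Value must be string"
--
--     placeholder_patterns = [
--         'your_real_',
--         'placeholder',
--         'example',
--         'test_',
--         'dummy',
--         'fake'
--     ]
--
--     value_lower = value.lower()
--     return any(pattern in value_lower for pattern in placeholder_patterns)
-- ===== SOURCE B (Python) =====
-- _TAILS = {
--     'y': ('our_real_',),
--     'p': ('laceholder',),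
--     'e': ('xample',),
--     't': ('est_',),
--     'd': ('ummy',),
--     'f': ('ake',),
-- }
--
--
-- def _is_placeholder_value(value: str) -> bool:
--     """Check if value is placeholder - one pass, first-letter dispatch, lazy lowercasing."""
--     assert isinstance(value, str), "Value must be string"
--     for i in range(len(value)):
--         for tail in _TAILS.get(value[i].lower(), ()):
--             if value[i + 1:i + 1 + len(tail)].lower() == tail:
--                 return True
--     return False
-- ===== Notes on version B (the rewrite author's own statement) =====
-- stated objective: alternative
-- what changed: Instead of lowercasing the whole string and running six independent substring scans, B makes a single left-to-right pass that lowercases characters lazily and, at each position, consults a dict keyed on the lowered first letter to decide which (at most one) pattern tail to compare there.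
import Mathlib
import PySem

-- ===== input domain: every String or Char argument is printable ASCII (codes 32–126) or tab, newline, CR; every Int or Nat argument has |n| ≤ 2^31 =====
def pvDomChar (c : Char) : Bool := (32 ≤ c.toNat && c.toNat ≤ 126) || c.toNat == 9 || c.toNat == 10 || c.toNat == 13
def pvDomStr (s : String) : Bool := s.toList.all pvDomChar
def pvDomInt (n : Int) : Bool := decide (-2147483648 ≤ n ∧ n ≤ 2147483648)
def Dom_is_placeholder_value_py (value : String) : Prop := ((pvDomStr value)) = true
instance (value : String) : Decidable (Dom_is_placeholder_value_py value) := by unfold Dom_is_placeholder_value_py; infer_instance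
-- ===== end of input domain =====

-- B replaces A's pipeline (lowercase the whole string, then six independent substring
-- scans) with a single left-to-right pass that lowercases characters lazily and, at each
-- position, checks only the tails dispatched by a dict keyed on the lowered first letter.

-- ===== PORT A =====
def is_placeholder_value_py (value : String) : Bool :=
  let placeholder_patterns : List String :=
    ["your_real_", "placeholder", "example", "test_", "dummy", "fake"]
  let value_lower := PySem.Str.lower value
  placeholder_patterns.any (fun pattern => PySem.Str.isIn pattern value_lower)

-- ===== PORT B =====
-- _TAILS: pattern tails keyed by the pattern's (lower-case) first letter.
def pvTails : PySem.Dict Char (List String) :=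
  PySem.Dict.ofList
    [('y', ["our_real_"]), ('p', ["laceholder"]), ('e', ["xample"]),
     ('t', ["est_"]), ('d', ["ummy"]), ('f', ["ake"])]

-- the `for i in range(len(value))` loop: one pass over the characters; at each position
-- dispatch on value[i].lower() and compare the slice value[i+1:i+1+len(tail)].lower().
def pvScan : List Char → Bool
  | [] => false
  | c :: t =>
      ((PySem.Dict.getD pvTails (PySem.Chars.lowerChar c) []).any
        (fun tail => PySem.Chars.lower (t.take tail.toList.length) == tail.toList))
      || pvScan t

def is_placeholder_value_py_alt (value : String) : Bool :=
  pvScan value.toList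

-- ===== PRECONDITION & SPEC =====
def Spec_is_placeholder_value_py (value : String) (out : Bool) : Prop := out = is_placeholder_value_py_alt value
instance (value : String) (out : Bool) : Decidable (Spec_is_placeholder_value_py value out) := by unfold Spec_is_placeholder_value_py; infer_instance

-- ===== CLAIM (what is proved, stated in full; the proofs are below) =====
def Claim_equal_is_placeholder_value_py : Prop := ∀ (value : String), Dom_is_placeholder_value_py value → Spec_is_placeholder_value_py value (is_placeholder_value_py value)

-- ===== LEMMAS AND PROOFS =====
def pvPatterns : List String :=
  ["your_real_", "placeholder", "example", "test_", "dummy", "fake"]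

theorem pv_take_lower_iff (t : List Char) (s : String) :
    PySem.Chars.lower (List.take s.length t) = s.toList ↔ s.toList <+: PySem.Chars.lower t := by
  have hlen : s.length = s.toList.length := rfl
  have hmap : PySem.Chars.lower (List.take s.length t)
      = (PySem.Chars.lower t).take s.toList.length := by
    rw [hlen]; simp [PySem.Chars.lower, List.map_take]
  rw [hmap, List.prefix_iff_eq_take, eq_comm]

theorem pv_any_single (t : List Char) (s : String) :
    (([s] : List String).any
        (fun tail => PySem.Chars.lower (t.take tail.toList.length) == tail.toList)) = true
      ↔ s.toList <+: PySem.Chars.lower t := by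
  simp only [List.any_cons, List.any_nil, Bool.or_false, beq_iff_eq]
  exact pv_take_lower_iff t s

theorem pv_inner_iff (c : Char) (t : List Char) :
    ((PySem.Dict.getD pvTails (PySem.Chars.lowerChar c) []).any
        (fun tail => PySem.Chars.lower (t.take tail.toList.length) == tail.toList)) = true
      ↔ ∃ p ∈ pvPatterns, p.toList <+: PySem.Chars.lowerChar c :: PySem.Chars.lower t := by
  have hitems : pvTails.items =
      [('y', ["our_real_"]), ('p', ["laceholder"]), ('e', ["xample"]),
       ('t', ["est_"]), ('d', ["ummy"]), ('f', ["ake"])] := by decide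
  by_cases hy : PySem.Chars.lowerChar c = 'y'
  · rw [hy, show PySem.Dict.getD pvTails 'y' [] = ["our_real_"] from by decide, pv_any_single]
    simp [pvPatterns, List.cons_prefix_cons]
  · by_cases hp : PySem.Chars.lowerChar c = 'p'
    · rw [hp, show PySem.Dict.getD pvTails 'p' [] = ["laceholder"] from by decide, pv_any_single]
      simp [pvPatterns, List.cons_prefix_cons]
    · by_cases he : PySem.Chars.lowerChar c = 'e'
      · rw [he, show PySem.Dict.getD pvTails 'e' [] = ["xample"] from by decide, pv_any_single]
        simp [pvPatterns, List.cons_prefix_cons]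
      · by_cases ht : PySem.Chars.lowerChar c = 't'
        · rw [ht, show PySem.Dict.getD pvTails 't' [] = ["est_"] from by decide, pv_any_single]
          simp [pvPatterns, List.cons_prefix_cons]
        · by_cases hd : PySem.Chars.lowerChar c = 'd'
          · rw [hd, show PySem.Dict.getD pvTails 'd' [] = ["ummy"] from by decide, pv_any_single]
            simp [pvPatterns, List.cons_prefix_cons]
          · by_cases hf : PySem.Chars.lowerChar c = 'f'
            · rw [hf, show PySem.Dict.getD pvTails 'f' [] = ["ake"] from by decide, pv_any_single]
              simp [pvPatterns, List.cons_prefix_cons]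
            · have hnone : List.find? (fun p => p.1 == PySem.Chars.lowerChar c)
                  pvTails.items = none := by
                rw [List.find?_eq_none]
                intro x hx
                rw [hitems] at hx
                fin_cases hx <;>
                  simp [Ne.symm hy, Ne.symm hp, Ne.symm he, Ne.symm ht, Ne.symm hd, Ne.symm hf]
              simp [PySem.Dict.getD, PySem.Dict.get?, hnone, pvPatterns,
                hy, hp, he, ht, hd, hf, Ne.symm hy, Ne.symm hp, Ne.symm he, Ne.symm ht,
                Ne.symm hd, Ne.symm hf, List.cons_prefix_cons]

theorem pvScan_iff (cs : List Char) :
    pvScan cs = true ↔ ∃ p ∈ pvPatterns, p.toList <:+: PySem.Chars.lower cs := by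
  induction cs with
  | nil => simp [pvScan, pvPatterns, PySem.Chars.lower]
  | cons c t ih =>
      have hlow : PySem.Chars.lower (c :: t)
          = PySem.Chars.lowerChar c :: PySem.Chars.lower t := by
        simp [PySem.Chars.lower]
      simp only [pvScan, Bool.or_eq_true, pv_inner_iff, ih, hlow, List.infix_cons_iff]
      constructor
      · rintro (⟨p, hp, h⟩ | ⟨p, hp, h⟩)
        · exact ⟨p, hp, Or.inl h⟩
        · exact ⟨p, hp, Or.inr h⟩
      · rintro ⟨p, hp, h | h⟩
        · exact Or.inl ⟨p, hp, h⟩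
        · exact Or.inr ⟨p, hp, h⟩

-- ===== VERDICT (by name: the statement is the Claim_ definition above) =====
theorem is_placeholder_value_py_spec : Claim_equal_is_placeholder_value_py := by
  intro value _
  unfold Spec_is_placeholder_value_py
  rw [Bool.eq_iff_iff]
  simp [is_placeholder_value_py, is_placeholder_value_py_alt, pvScan_iff,
    pvPatterns, PySem.Str.isIn_iff_infix, PySem.Chars.isIn_iff_infix]
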